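-- pv_equiv track=rewrite | github.com/tmuteke/py-convolution | convolution.py | hn_delays
-- ===== SOURCE A (Python) =====
-- def hn_delays(zeros, hn):
--     hn_delays = []
--     z = 0
--     while z <= len(zeros):
--         hn_delays.append(hn[:])
--         zeros_back = []
--         zeros_front = []
--         for x in range(len(zeros) - z):
--             zeros_back.append(0)
--         for y in range(z):
--             zeros_front.append(0)
--         hn_delays[z] += zeros_back
--         hn_delays[z] = zeros_front + hn_delays[z]
--         z += 1
--     return hn_delays
-- ===== SOURCE B (Python) =====
-- def hn_delays(zeros, hn):
--     n = len(zeros)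
--     padded = [0] * n + list(hn) + [0] * n
--     width = len(hn) + n
--     return [padded[n - z : n - z + width] for z in range(n + 1)]
-- ===== Notes on version B (the rewrite author's own statement) =====
-- stated objective: alternative
-- what changed: B builds one zero-padded buffer once and emits every row as a sliding-window slice of it, instead of constructing two fresh zero lists element-by-element and concatenating three pieces per row.
import Mathlib
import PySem

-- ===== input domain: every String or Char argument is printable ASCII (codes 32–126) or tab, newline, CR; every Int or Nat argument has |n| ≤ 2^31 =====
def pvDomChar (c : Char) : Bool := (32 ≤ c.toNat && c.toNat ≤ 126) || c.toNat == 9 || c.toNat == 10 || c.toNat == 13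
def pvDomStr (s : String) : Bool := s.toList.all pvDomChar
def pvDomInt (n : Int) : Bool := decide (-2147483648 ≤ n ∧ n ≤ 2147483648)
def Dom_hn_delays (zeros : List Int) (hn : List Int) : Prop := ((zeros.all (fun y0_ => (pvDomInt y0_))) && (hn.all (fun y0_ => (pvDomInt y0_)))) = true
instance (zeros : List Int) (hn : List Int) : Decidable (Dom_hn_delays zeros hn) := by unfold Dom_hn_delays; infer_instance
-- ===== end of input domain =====

-- B builds one zero-padded buffer and emits each row as a sliding-window slice of it; A concatenates freshly built zero lists per row (return values proved equal).

-- ===== PORT A =====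
def hn_delays (zeros : List Int) (hn : List Int) : List (List Int) :=
  -- while z <= len(zeros): append hn[:]; build zeros_back, zeros_front by append loops;
  -- hn_delays[z] += zeros_back; hn_delays[z] = zeros_front + hn_delays[z]
  (PySem.List.pyRange 0 ((zeros.length : Int) + 1) 1).foldl (fun acc z =>
    let row := hn
    let zeros_back := (PySem.List.pyRange 0 ((zeros.length : Int) - z) 1).foldl
      (fun a _ => a ++ [(0 : Int)]) []
    let zeros_front := (PySem.List.pyRange 0 z 1).foldl
      (fun a _ => a ++ [(0 : Int)]) []
    acc ++ [zeros_front ++ (row ++ zeros_back)]) []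

-- ===== PORT B =====
def hn_delays_alt (zeros : List Int) (hn : List Int) : List (List Int) :=
  let n := zeros.length
  let padded := List.replicate n (0 : Int) ++ hn ++ List.replicate n (0 : Int)
  let width := hn.length + n
  (PySem.List.pyRange 0 ((n : Int) + 1) 1).map (fun z =>
    PySem.List.slice padded (some ((n : Int) - z)) (some ((n : Int) - z + (width : Int))))

-- ===== PRECONDITION & SPEC =====
def Spec_hn_delays (zeros : List Int) (hn : List Int) (out : List (List Int)) : Prop := out = hn_delays_alt zeros hn
instance (zeros : List Int) (hn : List Int) (out : List (List Int)) : Decidable (Spec_hn_delays zeros hn out) := by unfold Spec_hn_delays; infer_instance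

-- ===== CLAIM (what is proved, stated in full; the proofs are below) =====
def Claim_equal_hn_delays : Prop := ∀ (zeros : List Int) (hn : List Int), Dom_hn_delays zeros hn → Spec_hn_delays zeros hn (hn_delays zeros hn)

-- ===== LEMMAS AND PROOFS =====

theorem pv_foldl_zeros (l : List Int) (acc : List Int) :
    l.foldl (fun a _ => a ++ [(0 : Int)]) acc = acc ++ List.replicate l.length 0 := by
  induction l generalizing acc with
  | nil => simp
  | cons x xs ih => simp [List.foldl_cons, ih, List.replicate_succ, List.append_assoc]

theorem pv_foldl_map {α β : Type} (f : α → β) (l : List α) (acc : List β) :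
    l.foldl (fun a x => a ++ [f x]) acc = acc ++ l.map f := by
  induction l generalizing acc with
  | nil => simp
  | cons x xs ih => simp [List.foldl_cons, ih]

-- canonical row: z leading zeros, hn, n-z trailing zeros
theorem pv_A_row (n : ℕ) (k : ℕ) :
    (PySem.List.pyRange 0 ((n : Int) - (k : Int)) 1).foldl (fun a _ => a ++ [(0 : Int)]) [] = List.replicate (n - k) 0 ∧
    (PySem.List.pyRange 0 ((k : Int)) 1).foldl (fun a _ => a ++ [(0 : Int)]) [] = List.replicate k 0 := by
  constructor <;> rw [pv_foldl_zeros] <;> simp [PySem.List.length_pyRange_one]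

theorem pv_B_row (n : ℕ) (hn : List Int) (k : ℕ) (hk : k ≤ n) :
    PySem.List.slice (List.replicate n (0 : Int) ++ hn ++ List.replicate n 0)
      (some ((n : Int) - (k : Int))) (some ((n : Int) - (k : Int) + ((hn.length + n : ℕ) : Int)))
    = List.replicate k 0 ++ hn ++ List.replicate (n - k) 0 := by
  have h0 : (0 : Int) ≤ (n : Int) - (k : Int) := by omega
  rw [PySem.List.slice_toNat _ h0 (by omega)]
  have h1 : ((n : Int) - (k : Int)).toNat = n - k := by omega
  have h2 : ((n : Int) - (k : Int) + ((hn.length + n : ℕ) : Int)).toNat = n - k + (hn.length + n) := by omega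
  rw [h1, h2]
  have hd : (List.replicate n (0 : Int) ++ hn ++ List.replicate n 0).drop (n - k)
      = List.replicate k 0 ++ hn ++ List.replicate n 0 := by
    rw [List.append_assoc, List.drop_append_of_le_length (by simp)]
    rw [List.drop_replicate, ← List.append_assoc]
    have : n - (n - k) = k := by omega
    rw [this]
  rw [hd]
  have hw : n - k + (hn.length + n) - (n - k) = hn.length + n := by omega
  rw [hw, List.append_assoc, List.take_append, List.take_replicate, List.take_append, List.take_replicate]
  simp only [List.length_replicate]
  have m1 : min (hn.length + n) k = k := by omega
  have m2 : hn.length + n - k - hn.length = n - k := by omega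
  have m3 : min (n - k) n = n - k := by omega
  rw [m1, m2, m3, List.take_of_length_le (by omega : hn.length ≤ hn.length + n - k), List.append_assoc]

theorem hn_delays_eq (zeros hn : List Int) :
    hn_delays zeros hn = hn_delays_alt zeros hn := by
  unfold hn_delays hn_delays_alt
  rw [pv_foldl_map (fun z => ((PySem.List.pyRange 0 z 1).foldl (fun a _ => a ++ [(0 : Int)]) []) ++ (hn ++ (PySem.List.pyRange 0 ((zeros.length : Int) - z) 1).foldl (fun a _ => a ++ [(0 : Int)]) []))]
  simp only [List.nil_append]
  apply List.map_congr_left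
  intro z hz
  rw [PySem.List.mem_pyRange_one] at hz
  obtain ⟨hz0, hz1⟩ := hz
  obtain ⟨k, rfl⟩ : ∃ k : ℕ, z = (k : Int) := ⟨z.toNat, by omega⟩
  have hk : k ≤ zeros.length := by exact_mod_cast by omega
  obtain ⟨hb, hf⟩ := pv_A_row zeros.length k
  rw [hb, hf, pv_B_row zeros.length hn k hk]
  simp [List.append_assoc]

-- ===== VERDICT (by name: the statement is the Claim_ definition above) =====
theorem hn_delays_spec : Claim_equal_hn_delays := by
  intro zeros hn _
  unfold Spec_hn_delays
  exact hn_delays_eq zeros hn
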